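-- pv_equiv track=rewrite | github.com/thanggdt999-source/chi-phi-ads-dashboard | app.py | detect_logical_last_data_row
-- ===== SOURCE A (Python) =====
-- from typing import Dict, List, Optional, Tuple
--
-- SHEET_DATA_START_ROW = 3  # Hàng 1=header, hàng 2=tổng/filter, hàng 3 trở đi là data
--
-- MAX_EMPTY_STREAK_TO_STOP_SCAN = 120
--
-- def has_core_data_in_chi_phi_ads_row(row: List[str]) -> bool:
--     """Data hop le o tab Chi phi ADS: cot A co ngay va co thong tin tai khoan/ten san pham."""
--     cell_date = row[0].strip() if len(row) > 0 else ""
--     cell_account = row[1].strip() if len(row) > 1 else ""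
--     cell_product = row[3].strip() if len(row) > 3 else ""
--     return bool(cell_date and (cell_account or cell_product))
--
-- def detect_logical_last_data_row(all_values: List[List[str]]) -> int:
--     """
--     Tim dong cuoi cung cua cum data logic, bo qua cac vung o xa bi formatting/rac.
--     Co che: sau khi da thay data, neu gap N dong trong lien tiep thi dung scan.
--     """
--     last_data_row = SHEET_DATA_START_ROW - 1
--     seen_data = False
--     empty_streak = 0
--
--     for i in range(SHEET_DATA_START_ROW - 1, len(all_values)):
--         row = all_values[i]
--         if has_core_data_in_chi_phi_ads_row(row):
--             seen_data = True
--             empty_streak = 0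
--             last_data_row = i + 1
--             continue
--
--         if seen_data:
--             empty_streak += 1
--             if empty_streak >= MAX_EMPTY_STREAK_TO_STOP_SCAN:
--                 break
--
--     return last_data_row
-- ===== SOURCE B (Python) =====
-- from typing import List
--
-- SHEET_DATA_START_ROW = 3
-- MAX_EMPTY_STREAK_TO_STOP_SCAN = 120
--
-- def has_core_data_in_chi_phi_ads_row(row: List[str]) -> bool:
--     cell_date = row[0].strip() if len(row) > 0 else ""
--     cell_account = row[1].strip() if len(row) > 1 else ""
--     cell_product = row[3].strip() if len(row) > 3 else ""
--     return bool(cell_date and (cell_account or cell_product))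
--
-- def detect_logical_last_data_row(all_values: List[List[str]]) -> int:
--     # Pass 1: collect the indices of all data rows in the scan region.
--     start = SHEET_DATA_START_ROW - 1
--     data_idxs = [i for i in range(start, len(all_values))
--                  if has_core_data_in_chi_phi_ads_row(all_values[i])]
--     if not data_idxs:
--         return start
--     # Pass 2: accept data indices while the gap between consecutive ones
--     # is smaller than a full stopping streak of empty rows.
--     prev = data_idxs[0]
--     for cur in data_idxs[1:]:
--         if cur - prev - 1 >= MAX_EMPTY_STREAK_TO_STOP_SCAN:
--             break
--         prev = cur
--     return prev + 1
-- ===== Notes on version B (the rewrite author's own statement) =====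
-- stated objective: alternative
-- what changed: Replaces A's single-pass streak-counting state machine (seen_data/empty_streak/last_data_row with an in-loop break) by two passes: collect the indices of data rows, then walk consecutive data indices and stop at the first gap of >= 120 empty rows.
import Mathlib
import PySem

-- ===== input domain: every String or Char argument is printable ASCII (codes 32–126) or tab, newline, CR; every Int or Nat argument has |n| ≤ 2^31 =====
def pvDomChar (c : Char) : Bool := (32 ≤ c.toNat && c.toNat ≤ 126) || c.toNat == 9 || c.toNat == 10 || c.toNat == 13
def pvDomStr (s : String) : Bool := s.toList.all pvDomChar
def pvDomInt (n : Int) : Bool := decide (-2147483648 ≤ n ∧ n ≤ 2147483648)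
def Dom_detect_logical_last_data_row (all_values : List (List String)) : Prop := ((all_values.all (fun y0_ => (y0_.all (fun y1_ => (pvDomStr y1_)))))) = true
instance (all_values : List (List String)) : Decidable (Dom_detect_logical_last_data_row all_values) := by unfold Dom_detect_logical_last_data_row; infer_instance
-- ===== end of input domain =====

-- B replaces A's streak-counting state machine by a collect-data-indices pass plus a
-- gap-scan pass over consecutive data indices (objective: alternative decomposition).

-- ===== PORT A =====
-- shared module helper has_core_data_in_chi_phi_ads_row (indices 0,1,3 guarded by len checks)
def has_core_data_in_chi_phi_ads_row (row : List String) : Bool :=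
  let cell_date := if 0 < row.length then PySem.Str.strip (row.getD 0 "") else ""
  let cell_account := if 1 < row.length then PySem.Str.strip (row.getD 1 "") else ""
  let cell_product := if 3 < row.length then PySem.Str.strip (row.getD 3 "") else ""
  cell_date ≠ "" && (cell_account ≠ "" || cell_product ≠ "")

-- A's for-loop over range(2, len) with break, as structural recursion carrying (i, last, seen, streak)
def pvLoopA (rows : List (List String)) (i last : Int) (seen : Bool) (streak : Int) : Int :=
  match rows with
  | [] => last
  | r :: rest =>
    if has_core_data_in_chi_phi_ads_row r then
      pvLoopA rest (i + 1) (i + 1) true 0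
    else if seen then
      (if streak + 1 ≥ 120 then last else pvLoopA rest (i + 1) last seen (streak + 1))
    else
      pvLoopA rest (i + 1) last seen streak

def detect_logical_last_data_row (all_values : List (List String)) : Int :=
  pvLoopA (all_values.drop 2) 2 2 false 0

-- ===== PORT B =====
-- pass 1: the comprehension collecting data-row indices
def pvCollect (rows : List (List String)) (i : Int) : List Int :=
  match rows with
  | [] => []
  | r :: rest =>
    if has_core_data_in_chi_phi_ads_row r then i :: pvCollect rest (i + 1)
    else pvCollect rest (i + 1)

-- pass 2: walk consecutive data indices, stop at a gap ≥ 120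
def pvGo (idxs : List Int) (prev : Int) : Int :=
  match idxs with
  | [] => prev + 1
  | c :: rest => if c - prev - 1 ≥ 120 then prev + 1 else pvGo rest c

def detect_logical_last_data_row_alt (all_values : List (List String)) : Int :=
  match pvCollect (all_values.drop 2) 2 with
  | [] => 2
  | c :: rest => pvGo rest c

-- ===== PRECONDITION & SPEC =====
def Spec_detect_logical_last_data_row (all_values : List (List String)) (out : Int) : Prop := out = detect_logical_last_data_row_alt all_values
instance (all_values : List (List String)) (out : Int) : Decidable (Spec_detect_logical_last_data_row all_values out) := by unfold Spec_detect_logical_last_data_row; infer_instance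

-- ===== CLAIM (what is proved, stated in full; the proofs are below) =====
def Claim_equal_detect_logical_last_data_row : Prop := ∀ (all_values : List (List String)), Dom_detect_logical_last_data_row all_values → Spec_detect_logical_last_data_row all_values (detect_logical_last_data_row all_values)

-- ===== LEMMAS AND PROOFS =====

lemma pvCollect_ge : ∀ (rows : List (List String)) (i c : Int), c ∈ pvCollect rows i → i ≤ c := by
  intro rows
  induction rows with
  | nil => intro i c h; simp [pvCollect] at h
  | cons r rest ih =>
    intro i c h
    simp only [pvCollect] at h
    split at h
    · rcases List.mem_cons.mp h with h | h
      · omega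
      · have := ih (i + 1) c h; omega
    · have := ih (i + 1) c h; omega

-- after the first data row: A's loop with last = prev+1, streak = k = i - prev - 1
lemma pvLoopA_seen : ∀ (rows : List (List String)) (i prev k : Int),
    k = i - prev - 1 → 0 ≤ k → k < 120 →
    pvLoopA rows i (prev + 1) true k = pvGo (pvCollect rows i) prev := by
  intro rows
  induction rows with
  | nil => intro i prev k _ _ _; simp [pvLoopA, pvCollect, pvGo]
  | cons r rest ih =>
    intro i prev k hk h0 h120
    simp only [pvLoopA, pvCollect]
    by_cases hc : has_core_data_in_chi_phi_ads_row r
    · simp only [hc, if_true]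
      rw [ih (i + 1) i 0 (by omega) (by omega) (by omega)]
      simp only [pvGo]
      rw [if_neg (by omega)]
    · simp only [hc, if_true]
      by_cases hb : k + 1 ≥ 120
      · rw [if_pos hb]
        cases hcol : pvCollect rest (i + 1) with
        | nil => rfl
        | cons c rest' =>
          have hcge : i + 1 ≤ c := pvCollect_ge rest (i + 1) c (by rw [hcol]; exact List.mem_cons_self ..)
          show prev + 1 = pvGo (c :: rest') prev
          unfold pvGo
          rw [if_pos (by omega : c - prev - 1 ≥ 120)]
      · rw [if_neg hb]
        exact ih (i + 1) prev (k + 1) (by omega) (by omega) (by omega)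

-- before any data row: last and streak are untouched
lemma pvLoopA_unseen : ∀ (rows : List (List String)) (i l s : Int),
    pvLoopA rows i l false s =
      (match pvCollect rows i with
       | [] => l
       | c :: rest => pvGo rest c) := by
  intro rows
  induction rows with
  | nil => intro i l s; simp [pvLoopA, pvCollect]
  | cons r rest ih =>
    intro i l s
    simp only [pvLoopA, pvCollect]
    by_cases hc : has_core_data_in_chi_phi_ads_row r
    · simp only [hc, if_true]
      exact pvLoopA_seen rest (i + 1) i 0 (by omega) (by omega) (by omega)
    · simp only [hc]
      exact ih (i + 1) l s

-- ===== VERDICT (by name: the statement is the Claim_ definition above) =====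
theorem detect_logical_last_data_row_spec : Claim_equal_detect_logical_last_data_row := by
  intro all_values _
  unfold Spec_detect_logical_last_data_row detect_logical_last_data_row detect_logical_last_data_row_alt
  exact pvLoopA_unseen (all_values.drop 2) 2 2 0
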